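-- pv_equiv track=rewrite | github.com/Nautilus-Institute/quals-2022 | not-so-advanced/post_it_notes.py | adler32x
-- ===== SOURCE A (Python) =====
-- def adler32x( buf ):
-- 	if type(buf) == type(b''):
-- 		buf = buf.decode('utf-8')
--
-- 	s1 = 1
-- 	s2 = 0
--
-- 	for i in buf:
-- 		s1 = (ord(i) + s1) % 65521
-- 		s2 = (s2 + s1) % 65521
--
-- 	return s1 ^ s2
-- ===== SOURCE B (Python) =====
-- def adler32x(buf):
--     if type(buf) == type(b''):
--         buf = buf.decode('utf-8')
--     n = len(buf)
--     total = sum(ord(c) for c in buf)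
--     weighted = sum((n - j) * ord(c) for j, c in enumerate(buf))
--     s1 = (1 + total) % 65521
--     s2 = (n + weighted) % 65521
--     return s1 ^ s2
-- ===== Notes on version B (the rewrite author's own statement) =====
-- stated objective: alternative
-- what changed: Replaced the coupled two-register recurrence (s1,s2 updated per character) by closed-form sums: s1 = (1+sum of codes) mod 65521 and s2 = (n + weighted sum with weight n-j) mod 65521, then xor.
import Mathlib
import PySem

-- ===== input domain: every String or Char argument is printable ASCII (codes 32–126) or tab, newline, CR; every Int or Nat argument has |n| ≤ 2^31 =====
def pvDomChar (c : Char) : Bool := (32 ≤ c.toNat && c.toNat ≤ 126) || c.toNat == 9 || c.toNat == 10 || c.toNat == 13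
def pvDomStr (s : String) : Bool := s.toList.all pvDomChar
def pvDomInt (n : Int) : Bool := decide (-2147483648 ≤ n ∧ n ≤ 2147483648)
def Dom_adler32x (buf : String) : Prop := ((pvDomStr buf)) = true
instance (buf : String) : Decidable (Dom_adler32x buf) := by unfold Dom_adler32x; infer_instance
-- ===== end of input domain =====

-- B replaces A's coupled two-register per-character recurrence with closed-form
-- sums (s1 = (1+Σ codes) mod 65521, s2 = (n + Σ (n-j)·code_j) mod 65521); alternative, same cost.

-- ===== PORT A =====
-- the loop body: s1 = (ord(i) + s1) % 65521; s2 = (s2 + s1) % 65521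
def adler32xStep (p : Int × Int) (i : Char) : Int × Int :=
  let s1 := PySem.Int.mod ((i.toNat : Int) + p.1) 65521
  (s1, PySem.Int.mod (p.2 + s1) 65521)

def adler32x (buf : String) : Int :=
  let st := buf.toList.foldl adler32xStep (1, 0)
  PySem.Int.bxor st.1 st.2

-- ===== PORT B =====
def adler32x_alt (buf : String) : Int :=
  let cs := buf.toList
  let n : Int := cs.length
  let total := (cs.map (fun c => (c.toNat : Int))).sum
  let weighted := ((PySem.List.enumerate cs).map (fun p => (n - p.1) * (p.2.toNat : Int))).sum
  let s1 := PySem.Int.mod (1 + total) 65521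
  let s2 := PySem.Int.mod (n + weighted) 65521
  PySem.Int.bxor s1 s2

-- ===== PRECONDITION & SPEC =====
def Spec_adler32x (buf : String) (out : Int) : Prop := out = adler32x_alt buf
instance (buf : String) (out : Int) : Decidable (Spec_adler32x buf out) := by unfold Spec_adler32x; infer_instance

-- ===== CLAIM (what is proved, stated in full; the proofs are below) =====
def Claim_equal_adler32x : Prop := ∀ (buf : String), Dom_adler32x buf → Spec_adler32x buf (adler32x buf)

-- ===== LEMMAS AND PROOFS =====

-- recursive weighted sum: Wr (c::cs) m = m*code c + Wr cs (m-1)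
def Wr : List Char → Int → Int
  | [], _ => 0
  | c :: cs, m => m * (c.toNat : Int) + Wr cs (m - 1)

def Tsum (cs : List Char) : Int := (cs.map (fun c => (c.toNat : Int))).sum

lemma enum_weight_sum (cs : List Char) (m s : Int) :
    ((PySem.List.enumerate cs s).map (fun p => (m - p.1) * (p.2.toNat : Int))).sum
      = Wr cs (m - s) := by
  induction cs generalizing s with
  | nil => simp [PySem.List.enumerate_nil, Wr]
  | cons c cs ih =>
      simp only [PySem.List.enumerate_cons, List.map_cons, List.sum_cons, Wr, ih]
      ring_nf

lemma mod_pos (a : Int) : PySem.Int.mod a 65521 = a % 65521 :=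
  PySem.Int.mod_eq_emod_of_pos (by norm_num)

lemma loop_inv (cs : List Char) (a b : Int) :
    cs.foldl adler32xStep (a % 65521, b % 65521)
      = ((a + Tsum cs) % 65521,
         (b + (cs.length : Int) * a + Wr cs cs.length) % 65521) := by
  induction cs generalizing a b with
  | nil => simp [Tsum, Wr]
  | cons c cs ih =>
      have h1 : adler32xStep (a % 65521, b % 65521) c
          = ((a + (c.toNat : Int)) % 65521, (b + a + (c.toNat : Int)) % 65521) := by
        simp only [adler32xStep, mod_pos, Prod.mk.injEq]
        constructor <;> omega
      rw [List.foldl_cons, h1, ih (a + (c.toNat : Int)) (b + a + (c.toNat : Int))]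
      simp only [Tsum, List.map_cons, List.sum_cons, Wr, List.length_cons, Prod.mk.injEq]
      push_cast
      constructor <;> (congr 1; ring_nf)

-- ===== VERDICT (by name: the statement is the Claim_ definition above) =====
theorem adler32x_spec : Claim_equal_adler32x := by
  intro buf _
  show adler32x buf = adler32x_alt buf
  simp only [adler32x, adler32x_alt, mod_pos]
  have h0 : ((1 : Int), (0 : Int)) = ((1 : Int) % 65521, (0 : Int) % 65521) := by decide
  rw [h0, loop_inv, enum_weight_sum]
  simp only [sub_zero, Tsum]
  congr 2
  ring
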